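-- pv_equiv track=rewrite | github.com/krisruns/stx-xc-training | overview_to_week_schedule.py | determine_pre_post
-- ===== SOURCE A (Python) =====
-- STANDARD_WARMUPS = {
--     'easy_day': "Foot Drills, Dynamics",
--     'workout_day': "WU, Dynamics",
--     'easy_recovery': "Foot Drills, Awesomizer",
--     'long_run_day': "Awesomizer, Lunge Matrix",
--     'race_day': "Race Day WU",
--     'rest_day': "Foot Drills, Mobility A/B"
-- }
--
-- STANDARD_COOLDOWNS = {
--     'easy_day': "Strides; Mobility/Strength A",
--     'workout_day': "Mobility/Strength B",
--     'long_run_day': "Strides; Mobilty A, 18s",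
--     'post_race': "Post Race",
--     'rest_day': "Strength",
--     'progression_lr': "Mobility A, 21s"
-- }
--
-- def determine_pre_post(workout_desc, day):
--     """Determine appropriate Pre and Post workout routines"""
--     desc_lower = str(workout_desc).lower() if workout_desc else ''
--
--     # Race day
--     if 'race' in desc_lower:
--         return STANDARD_WARMUPS['race_day'], STANDARD_COOLDOWNS['post_race']
--
--     # Rest day
--     elif 'rest' in desc_lower:
--         return STANDARD_WARMUPS['rest_day'], STANDARD_COOLDOWNS['rest_day']
--
--     # Long run or progression
--     elif 'long run' in desc_lower or 'lr' in desc_lower or 'progression' in desc_lower: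
--         if 'progression' in desc_lower:
--             return STANDARD_WARMUPS['workout_day'], STANDARD_COOLDOWNS['progression_lr']
--         return STANDARD_WARMUPS['long_run_day'], STANDARD_COOLDOWNS['long_run_day']
--
--     # Workout days (hills, fartlek, intervals)
--     elif any(x in desc_lower for x in ['hill', 'fartlek', 'pre', 'interval', 'tempo']):
--         return STANDARD_WARMUPS['workout_day'], STANDARD_COOLDOWNS['workout_day']
--
--     # Day-specific patterns for easy runs
--     # Friday easy runs (pre-race)
--     elif day == 'Friday':
--         return STANDARD_WARMUPS['easy_recovery'], STANDARD_COOLDOWNS['post_race']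
--
--     # Wednesday easy runs (uses Awesomizer warmup)
--     elif day == 'Wednesday':
--         return STANDARD_WARMUPS['long_run_day'], STANDARD_COOLDOWNS['long_run_day']
--
--     # Monday easy runs (standard)
--     elif day == 'Monday':
--         return STANDARD_WARMUPS['easy_day'], STANDARD_COOLDOWNS['easy_day']
--
--     # Default easy day
--     else:
--         return STANDARD_WARMUPS['easy_day'], STANDARD_COOLDOWNS['easy_day']
-- ===== SOURCE B (Python) =====
-- STANDARD_WARMUPS = {
--     'easy_day': "Foot Drills, Dynamics",
--     'workout_day': "WU, Dynamics",
--     'easy_recovery': "Foot Drills, Awesomizer",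
--     'long_run_day': "Awesomizer, Lunge Matrix",
--     'race_day': "Race Day WU",
--     'rest_day': "Foot Drills, Mobility A/B"
-- }
--
-- STANDARD_COOLDOWNS = {
--     'easy_day': "Strides; Mobility/Strength A",
--     'workout_day': "Mobility/Strength B",
--     'long_run_day': "Strides; Mobilty A, 18s",
--     'post_race': "Post Race",
--     'rest_day': "Strength",
--     'progression_lr': "Mobility A, 21s"
-- }
--
-- # Each keyword maps to a category number; the smallest category found wins.
-- _KEYWORD_CATEGORY = {
--     'race': 0, 'rest': 1, 'progression': 2, 'long run': 3, 'lr': 3,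
--     'hill': 4, 'fartlek': 4, 'pre': 4, 'interval': 4, 'tempo': 4,
-- }
-- _DAY_CATEGORY = {'Friday': 5, 'Wednesday': 6}
-- _CATEGORY_RESULT = [
--     (STANDARD_WARMUPS['race_day'], STANDARD_COOLDOWNS['post_race']),       # 0 race
--     (STANDARD_WARMUPS['rest_day'], STANDARD_COOLDOWNS['rest_day']),        # 1 rest
--     (STANDARD_WARMUPS['workout_day'], STANDARD_COOLDOWNS['progression_lr']),  # 2 progression
--     (STANDARD_WARMUPS['long_run_day'], STANDARD_COOLDOWNS['long_run_day']),   # 3 long run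
--     (STANDARD_WARMUPS['workout_day'], STANDARD_COOLDOWNS['workout_day']),     # 4 workout
--     (STANDARD_WARMUPS['easy_recovery'], STANDARD_COOLDOWNS['post_race']),     # 5 Friday easy
--     (STANDARD_WARMUPS['long_run_day'], STANDARD_COOLDOWNS['long_run_day']),   # 6 Wednesday easy
--     (STANDARD_WARMUPS['easy_day'], STANDARD_COOLDOWNS['easy_day']),           # 7 default easy
-- ]
--
-- def determine_pre_post(workout_desc, day):
--     """Determine appropriate Pre and Post workout routines.
--
--     Collect the categories of all keywords occurring in the description and
--     take the minimum (highest-priority) one; if no keyword occurs, the day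
--     decides the category. Then index the result table by the category.
--     """
--     s = str(workout_desc).lower() if workout_desc else ''
--     found = [c for k, c in _KEYWORD_CATEGORY.items() if k in s]
--     cat = min(found) if found else _DAY_CATEGORY.get(day, 7)
--     return _CATEGORY_RESULT[cat]
-- ===== Notes on version B (the rewrite author's own statement) =====
-- stated objective: alternative
-- what changed: Replaced the if/elif condition cascade by a priority scheme: a keyword-to-category map is scanned once for keywords occurring in the description, the minimum category found (or a day-derived category when none is found) indexes a flat result table, instead of short-circuit branch-by-branch control flow.
import Mathlib
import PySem

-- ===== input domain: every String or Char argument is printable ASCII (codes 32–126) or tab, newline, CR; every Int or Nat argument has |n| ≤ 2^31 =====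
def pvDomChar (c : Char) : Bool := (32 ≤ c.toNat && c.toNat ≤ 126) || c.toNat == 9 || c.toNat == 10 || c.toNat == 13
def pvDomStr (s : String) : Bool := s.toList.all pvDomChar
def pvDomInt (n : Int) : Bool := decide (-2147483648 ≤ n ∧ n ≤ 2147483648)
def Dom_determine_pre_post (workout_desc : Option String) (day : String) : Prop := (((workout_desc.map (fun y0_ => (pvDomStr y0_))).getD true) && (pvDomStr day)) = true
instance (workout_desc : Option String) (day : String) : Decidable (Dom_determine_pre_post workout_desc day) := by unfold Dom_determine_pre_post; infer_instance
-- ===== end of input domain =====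

-- B replaces A's if/elif cascade by a keyword→category map: it collects the categories of all keywords present, takes the minimum, and indexes a result table (day decides when no keyword matches); objective: alternative, same cost.

-- ===== PORT A =====
-- the body of A after desc_lower is computed (the if/elif cascade)
def dppCascade (desc_lower : String) (day : String) : String × String :=
  if PySem.Str.isIn "race" desc_lower then
    ("Race Day WU", "Post Race")
  else if PySem.Str.isIn "rest" desc_lower then
    ("Foot Drills, Mobility A/B", "Strength")
  else if PySem.Str.isIn "long run" desc_lower || PySem.Str.isIn "lr" desc_lower
       || PySem.Str.isIn "progression" desc_lower then
    if PySem.Str.isIn "progression" desc_lower then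
      ("WU, Dynamics", "Mobility A, 21s")
    else
      ("Awesomizer, Lunge Matrix", "Strides; Mobilty A, 18s")
  else if ["hill", "fartlek", "pre", "interval", "tempo"].any
        (fun x => PySem.Str.isIn x desc_lower) then
    ("WU, Dynamics", "Mobility/Strength B")
  else if day == "Friday" then
    ("Foot Drills, Awesomizer", "Post Race")
  else if day == "Wednesday" then
    ("Awesomizer, Lunge Matrix", "Strides; Mobilty A, 18s")
  else if day == "Monday" then
    ("Foot Drills, Dynamics", "Strides; Mobility/Strength A")
  else
    ("Foot Drills, Dynamics", "Strides; Mobility/Strength A")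

def determine_pre_post (workout_desc : Option String) (day : String) : String × String :=
  -- desc_lower = str(workout_desc).lower() if workout_desc else ''
  let desc_lower : String :=
    match workout_desc with
    | none => ""
    | some s => if PySem.Str.len s = 0 then "" else PySem.Str.lower s
  dppCascade desc_lower day

-- ===== PORT B =====
-- _KEYWORD_CATEGORY.items(): keyword → category number (smallest category found wins)
def dppKwCats : List (String × Int) :=
  [("race", 0), ("rest", 1), ("progression", 2), ("long run", 3), ("lr", 3),
   ("hill", 4), ("fartlek", 4), ("pre", 4), ("interval", 4), ("tempo", 4)]

-- _DAY_CATEGORY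
def dppDayCats : PySem.Dict String Int := PySem.Dict.ofList [("Friday", 5), ("Wednesday", 6)]

-- _CATEGORY_RESULT
def dppResults : List (String × String) :=
  [("Race Day WU", "Post Race"),
   ("Foot Drills, Mobility A/B", "Strength"),
   ("WU, Dynamics", "Mobility A, 21s"),
   ("Awesomizer, Lunge Matrix", "Strides; Mobilty A, 18s"),
   ("WU, Dynamics", "Mobility/Strength B"),
   ("Foot Drills, Awesomizer", "Post Race"),
   ("Awesomizer, Lunge Matrix", "Strides; Mobilty A, 18s"),
   ("Foot Drills, Dynamics", "Strides; Mobility/Strength A")]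

def determine_pre_post_alt (workout_desc : Option String) (day : String) : String × String :=
  let s : String :=
    match workout_desc with
    | none => ""
    | some t => if PySem.Str.len t = 0 then "" else PySem.Str.lower t
  -- found = [c for k, c in _KEYWORD_CATEGORY.items() if k in s]
  let found : List Int := (dppKwCats.filter (fun kc => PySem.Str.isIn kc.1 s)).map (·.2)
  -- cat = min(found) if found else _DAY_CATEGORY.get(day, 7)
  let cat : Int :=
    match PySem.List.min? found (fun x => x) with
    | some m => m
    | none => PySem.Dict.getD dppDayCats day 7
  -- _CATEGORY_RESULT[cat]; the index is always in range 0..7, so the IndexError default is unreachable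
  (PySem.List.pyGet? dppResults cat).getD ("", "")

-- ===== PRECONDITION & SPEC =====
def Spec_determine_pre_post (workout_desc : Option String) (day : String) (out : String × String) : Prop := out = determine_pre_post_alt workout_desc day
instance (workout_desc : Option String) (day : String) (out : String × String) : Decidable (Spec_determine_pre_post workout_desc day out) := by unfold Spec_determine_pre_post; infer_instance

-- ===== CLAIM (what is proved, stated in full; the proofs are below) =====
def Claim_equal_determine_pre_post : Prop := ∀ (workout_desc : Option String) (day : String), Dom_determine_pre_post workout_desc day → Spec_determine_pre_post workout_desc day (determine_pre_post workout_desc day)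

-- ===== LEMMAS AND PROOFS =====

-- B's body after s is computed, as a function of s and day
def dppTableB (s : String) (day : String) : String × String :=
  let found : List Int := (dppKwCats.filter (fun kc => PySem.Str.isIn kc.1 s)).map (·.2)
  let cat : Int :=
    match PySem.List.min? found (fun x => x) with
    | some m => m
    | none => PySem.Dict.getD dppDayCats day 7
  (PySem.List.pyGet? dppResults cat).getD ("", "")

theorem dayCat (day : String) :
    PySem.Dict.getD dppDayCats day 7 =
      if day == "Friday" then 5 else if day == "Wednesday" then 6 else 7 := by
  have h : dppDayCats = PySem.Dict.mk [("Friday", 5), ("Wednesday", 6)] := by rfl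
  rw [h]
  by_cases hf : day = "Friday"
  · subst hf; decide
  · by_cases hw : day = "Wednesday"
    · subst hw; decide
    · have hf' : ("Friday" == day) = false := beq_eq_false_iff_ne.mpr (Ne.symm hf)
      have hw' : ("Wednesday" == day) = false := beq_eq_false_iff_ne.mpr (Ne.symm hw)
      simp [PySem.Dict.getD, PySem.Dict.get?, hf', hw', hf, hw]

-- unfold a literal filter+map linearly (avoids the exponential if-duplication of filter_cons)
theorem filter_map_cons {A C : Type} (p : A → Bool) (f : A → C) (x : A) (xs : List A) :
    ((x :: xs).filter p).map f = (if p x then [f x] else []) ++ (xs.filter p).map f := by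
  cases h : p x <;> simp [h]

theorem dppCascade_eq_dppTableB (s day : String) : dppCascade s day = dppTableB s day := by
  unfold dppCascade dppTableB dppKwCats
  rw [dayCat]
  simp only [filter_map_cons, List.filter_nil, List.map_nil, List.any_cons, List.any_nil,
    Bool.or_false]
  generalize PySem.Str.isIn "race" s = b1
  generalize PySem.Str.isIn "rest" s = b2
  generalize PySem.Str.isIn "progression" s = b3
  generalize PySem.Str.isIn "long run" s = b4
  generalize PySem.Str.isIn "lr" s = b5
  generalize PySem.Str.isIn "hill" s = b6
  generalize PySem.Str.isIn "fartlek" s = b7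
  generalize PySem.Str.isIn "pre" s = b8
  generalize PySem.Str.isIn "interval" s = b9
  generalize PySem.Str.isIn "tempo" s = b10
  generalize (day == "Friday") = d1
  generalize (day == "Wednesday") = d2
  generalize (day == "Monday") = d3
  revert b1 b2 b3 b4 b5 b6 b7 b8 b9 b10 d1 d2 d3
  decide

theorem determine_pre_post_spec : Claim_equal_determine_pre_post := by
  intro wd day _
  unfold Spec_determine_pre_post determine_pre_post determine_pre_post_alt
  cases wd <;> exact dppCascade_eq_dppTableB _ day
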